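-- pv_equiv track=rewrite | github.com/grelyelo/alienshuf | alienshuf.py | fixFiletype
-- ===== SOURCE A (Python) =====
-- def fixFiletype(filetype):
--     if filetype is not None:
--         i = 0
--         while( i < len(filetype) and not filetype[i].isalnum() ):
--             i+=1
--         stringBegin = i
--         while( i < len(filetype) and filetype[i].isalnum() ):
--             i+=1
--         stringEnd = i
--         return filetype[stringBegin:stringEnd]
--     else:
--         return None
-- ===== SOURCE B (Python) =====
-- def fixFiletype(filetype):
--     # Single forward pass with a state flag instead of two index-walking scans.
--     if filetype is None:
--         return None
--     out = []
--     started = False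
--     for ch in filetype:
--         if ch.isalnum():
--             out.append(ch)
--             started = True
--         elif started:
--             break
--     return ''.join(out)
-- ===== Notes on version B (the rewrite author's own statement) =====
-- stated objective: alternative
-- what changed: Replaces the two index-walking while loops plus a slice by a single for-each pass that accumulates the first alphanumeric run with a state flag and breaks when it ends.
import Mathlib
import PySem

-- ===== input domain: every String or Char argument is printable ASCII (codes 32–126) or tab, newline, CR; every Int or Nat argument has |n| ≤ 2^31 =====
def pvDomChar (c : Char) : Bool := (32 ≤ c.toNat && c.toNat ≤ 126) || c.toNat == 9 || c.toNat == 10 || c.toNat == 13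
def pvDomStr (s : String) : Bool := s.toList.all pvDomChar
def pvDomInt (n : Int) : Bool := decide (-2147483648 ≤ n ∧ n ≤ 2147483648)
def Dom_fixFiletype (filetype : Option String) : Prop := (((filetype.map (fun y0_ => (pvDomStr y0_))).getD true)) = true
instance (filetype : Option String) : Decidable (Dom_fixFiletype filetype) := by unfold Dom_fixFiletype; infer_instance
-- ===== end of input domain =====

-- B differs from A by a single for-each accumulation pass instead of two index scans + slice.

-- ===== PORT A =====
-- first while loop: advance i while i < len and not filetype[i].isalnum()
def pvScanNon (cs : List Char) (i : Nat) : Nat :=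
  if h : i < cs.length then
    if ¬ (PySem.Chars.isalnum cs[i] = true) then pvScanNon cs (i + 1) else i
  else i
termination_by cs.length - i

-- second while loop: advance i while i < len and filetype[i].isalnum()
def pvScanAln (cs : List Char) (i : Nat) : Nat :=
  if h : i < cs.length then
    if PySem.Chars.isalnum cs[i] = true then pvScanAln cs (i + 1) else i
  else i
termination_by cs.length - i

def fixFiletype (filetype : Option String) : Option String :=
  match filetype with
  | some s =>
      let cs := s.toList
      let stringBegin := pvScanNon cs 0
      let stringEnd := pvScanAln cs stringBegin
      some (String.ofList (PySem.List.slice cs (some (stringBegin : Int)) (some (stringEnd : Int))))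
  | none => none

-- ===== PORT B =====
-- the for loop of Source B: out/started accumulator, break on end of the run
def pvAltLoop : List Char → List Char → Bool → List Char
  | [], out, _ => out
  | c :: cs, out, started =>
    if PySem.Chars.isalnum c then pvAltLoop cs (out ++ [c]) true
    else if started then out
    else pvAltLoop cs out started

def fixFiletype_alt (filetype : Option String) : Option String :=
  match filetype with
  | some s => some (String.ofList (pvAltLoop s.toList [] false))
  | none => none

-- ===== PRECONDITION & SPEC =====
def Spec_fixFiletype (filetype : Option String) (out : Option String) : Prop := out = fixFiletype_alt filetype
instance (filetype : Option String) (out : Option String) : Decidable (Spec_fixFiletype filetype out) := by unfold Spec_fixFiletype; infer_instance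

-- ===== CLAIM (what is proved, stated in full; the proofs are below) =====
def Claim_equal_fixFiletype : Prop := ∀ (filetype : Option String), Dom_fixFiletype filetype → Spec_fixFiletype filetype (fixFiletype filetype)

-- ===== LEMMAS AND PROOFS =====

theorem pvScanNon_eq (cs : List Char) (i : Nat) (h : i ≤ cs.length) :
    pvScanNon cs i = i + ((cs.drop i).takeWhile (fun c => !PySem.Chars.isalnum c)).length := by
  rw [pvScanNon]
  by_cases hi : i < cs.length
  · rw [List.drop_eq_getElem_cons hi, List.takeWhile_cons]
    by_cases ha : PySem.Chars.isalnum cs[i] = true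
    · simp [hi, ha]
    · have hb : (!PySem.Chars.isalnum cs[i]) = true := by simp [ha]
      rw [dif_pos hi, if_pos ha, hb, if_pos rfl, pvScanNon_eq cs (i + 1) (by omega)]
      simp; omega
  · have : i = cs.length := by omega
    simp [this]
termination_by cs.length - i

theorem pvScanAln_eq (cs : List Char) (i : Nat) (h : i ≤ cs.length) :
    pvScanAln cs i = i + ((cs.drop i).takeWhile (fun c => PySem.Chars.isalnum c)).length := by
  rw [pvScanAln]
  by_cases hi : i < cs.length
  · rw [List.drop_eq_getElem_cons hi, List.takeWhile_cons]
    by_cases ha : PySem.Chars.isalnum cs[i] = true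
    · simp only [hi, dif_pos, ha, if_true]
      rw [pvScanAln_eq cs (i + 1) (by omega)]
      simp; omega
    · simp [hi, ha]
  · have : i = cs.length := by omega
    simp [this]
termination_by cs.length - i

theorem take_length_takeWhile {α : Type} (p : α → Bool) (l : List α) :
    l.take (l.takeWhile p).length = l.takeWhile p := by
  induction l with
  | nil => rfl
  | cons a l ih =>
    rw [List.takeWhile_cons]
    by_cases h : p a = true <;> simp [h, ih]

theorem drop_length_takeWhile {α : Type} (p : α → Bool) (l : List α) :
    l.drop (l.takeWhile p).length = l.dropWhile p := by
  induction l with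
  | nil => rfl
  | cons a l ih =>
    rw [List.takeWhile_cons, List.dropWhile_cons]
    by_cases h : p a = true <;> simp [h, ih]

theorem pvAltLoop_true (cs out : List Char) :
    pvAltLoop cs out true = out ++ cs.takeWhile (fun c => PySem.Chars.isalnum c) := by
  induction cs generalizing out with
  | nil => simp [pvAltLoop]
  | cons c cs ih =>
    rw [pvAltLoop, List.takeWhile_cons]
    by_cases h : PySem.Chars.isalnum c = true <;> simp [h, ih]

theorem pvAltLoop_false (cs : List Char) :
    pvAltLoop cs [] false =
      (cs.dropWhile (fun c => !PySem.Chars.isalnum c)).takeWhile (fun c => PySem.Chars.isalnum c) := by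
  induction cs with
  | nil => rfl
  | cons c cs ih =>
    rw [pvAltLoop, List.dropWhile_cons]
    by_cases h : PySem.Chars.isalnum c = true
    · simp [pvAltLoop_true, h]
    · simp [h, ih]

theorem fixFiletype_lists (cs : List Char) :
    PySem.List.slice cs (some ((pvScanNon cs 0 : Nat) : Int))
        (some ((pvScanAln cs (pvScanNon cs 0) : Nat) : Int)) = pvAltLoop cs [] false := by
  have hb : pvScanNon cs 0 = ((cs.takeWhile (fun c => !PySem.Chars.isalnum c)).length) := by
    simpa using pvScanNon_eq cs 0 (by omega)
  have hble : pvScanNon cs 0 ≤ cs.length := by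
    rw [hb]; exact (List.takeWhile_sublist _).length_le
  have he := pvScanAln_eq cs (pvScanNon cs 0) hble
  rw [PySem.List.slice_natCast, he]
  rw [Nat.add_sub_cancel_left]
  rw [take_length_takeWhile, hb, drop_length_takeWhile, pvAltLoop_false]

-- ===== VERDICT (by name: the statement is the Claim_ definition above) =====
theorem fixFiletype_spec : Claim_equal_fixFiletype := by
  intro filetype _
  unfold Spec_fixFiletype fixFiletype fixFiletype_alt
  match filetype with
  | none => rfl
  | some s => simp [fixFiletype_lists]
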